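-- pv_equiv track=rewrite | github.com/aschau/aschau.github.io | games/parsed/generate.py | _get_condition
-- ===== SOURCE A (Python) =====
-- def _get_condition(line):
--     tokens = []
--     started = False
--     for t in line:
--         if t == '{':
--             break
--         if started:
--             tokens.append(t)
--         if t in ('while', 'if'):
--             started = True
--     return tokens
-- ===== SOURCE B (Python) =====
-- def _get_condition(line):
--     try:
--         end = line.index('{')
--     except ValueError:
--         end = len(line)
--     head = line[:end]
--     for i, t in enumerate(head):
--         if t in ('while', 'if'):
--             return head[i + 1:]
--     return []
-- ===== Notes on version B (the rewrite author's own statement) =====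
-- stated objective: simpler
-- what changed: Replaces the flag-accumulation loop with locating two delimiter positions (first '{' and first 'while'/'if' before it) and returning one slice.
import Mathlib
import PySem

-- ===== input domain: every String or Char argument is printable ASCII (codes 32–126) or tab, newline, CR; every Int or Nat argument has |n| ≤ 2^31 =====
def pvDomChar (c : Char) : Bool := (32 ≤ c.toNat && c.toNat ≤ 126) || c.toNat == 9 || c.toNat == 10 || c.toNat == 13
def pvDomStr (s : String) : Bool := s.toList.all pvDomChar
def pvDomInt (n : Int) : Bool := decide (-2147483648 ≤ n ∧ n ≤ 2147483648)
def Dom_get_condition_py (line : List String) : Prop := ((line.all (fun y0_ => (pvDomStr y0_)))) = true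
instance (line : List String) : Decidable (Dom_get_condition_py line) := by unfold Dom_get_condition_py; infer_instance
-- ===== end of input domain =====

-- B replaces A's flag-accumulation loop by locating the first '{' and the first
-- keyword before it, then returning a single slice; objective: simpler.


-- ===== PORT A =====
-- literal transliteration of A's loop: break on '{', append when started, then set started on keyword
def getCondGo : List String → Bool → List String
  | [], _ => []
  | t :: rest, started =>
    if t = "{" then []
    else
      (if started then [t] else []) ++
        getCondGo rest (started || (t = "while" || t = "if"))

def get_condition_py (line : List String) : List String :=
  getCondGo line false

-- ===== PORT B =====
-- B: end = index of first '{' (or length), head = line[:end], return head[i+1:] at first keyword i, else []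
def get_condition_py_alt (line : List String) : List String :=
  let e := (line.idxOf? "{").getD line.length
  let head := line.take e
  match head.findIdx? (fun t => t = "while" || t = "if") with
  | some i => head.drop (i + 1)
  | none => []

-- ===== PRECONDITION & SPEC =====
def Spec_get_condition_py (line : List String) (out : List String) : Prop := out = get_condition_py_alt line
instance (line : List String) (out : List String) : Decidable (Spec_get_condition_py line out) := by unfold Spec_get_condition_py; infer_instance

-- ===== CLAIM (what is proved, stated in full; the proofs are below) =====
def Claim_equal_get_condition_py : Prop := ∀ (line : List String), Dom_get_condition_py line → Spec_get_condition_py line (get_condition_py line)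

-- ===== LEMMAS AND PROOFS =====

-- line[:end] with end = first index of '{' (or length) is the takeWhile prefix
theorem take_idxOf_brace (line : List String) :
    line.take ((line.idxOf? "{").getD line.length) = line.takeWhile (fun t => t ≠ "{") := by
  induction line with
  | nil => rfl
  | cons t rest ih =>
    by_cases h : t = "{"
    · simp [List.idxOf?, List.findIdx?_cons, h, List.takeWhile]
    · simp only [List.idxOf?, List.findIdx?_cons] at *
      simp [h, List.takeWhile_cons, Option.getD_map, List.take_succ_cons, ih]

-- the started=true state collects everything up to the first '{'
theorem getCondGo_true (line : List String) :
    getCondGo line true = line.takeWhile (fun t => t ≠ "{") := by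
  induction line with
  | nil => rfl
  | cons t rest ih =>
    by_cases h : t = "{" <;> simp [getCondGo, h, List.takeWhile_cons, ih]

theorem getCondGo_false (line : List String) :
    getCondGo line false =
      match (line.takeWhile (fun t => t ≠ "{")).findIdx? (fun t => t = "while" || t = "if") with
      | some i => (line.takeWhile (fun t => t ≠ "{")).drop (i + 1)
      | none => [] := by
  induction line with
  | nil => rfl
  | cons t rest ih =>
    by_cases hb : t = "{"
    · simp [getCondGo, hb, List.takeWhile_cons]
    · by_cases hk : (t = "while" || t = "if") = true
      · simp [getCondGo, hb, hk, List.takeWhile_cons, List.findIdx?_cons, getCondGo_true]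
      · simp only [getCondGo, hb, if_false, hk, Bool.false_or, List.takeWhile_cons,
          if_pos (by simp [hb] : (decide (t ≠ "{")) = true), List.findIdx?_cons]
        simp only [ih]
        cases hfi : (rest.takeWhile (fun t => t ≠ "{")).findIdx? (fun t => t = "while" || t = "if") with
        | none => simp
        | some i => simp [List.drop_succ_cons]

-- ===== VERDICT (by name: the statement is the Claim_ definition above) =====
theorem get_condition_py_spec : Claim_equal_get_condition_py := by
  intro line _
  unfold Spec_get_condition_py get_condition_py get_condition_py_alt
  simp only []
  rw [take_idxOf_brace, getCondGo_false]
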